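-- pv_equiv track=rewrite | github.com/rdguerrerom/RECURSUM | benchmarks/analysis/plot_hermite_comparison.py | extract_coefficient_from_name
-- ===== SOURCE A (Python) =====
-- def extract_coefficient_from_name(name):
--     """Extract nA, nB, t from benchmark name like 'BM_Compare_E_0_0_0'."""
--     parts = name.split('_')
--     try:
--         # Look for pattern with three consecutive integers at the end
--         for i in range(len(parts) - 2):
--             try:
--                 nA = int(parts[i])
--                 nB = int(parts[i + 1])
--                 t = int(parts[i + 2])
--                 return nA, nB, t
--             except ValueError:
--                 continue
--     except (ValueError, IndexError):
--         pass
--     return None, None, None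
-- ===== SOURCE B (Python) =====
-- def extract_coefficient_from_name(name):
--     """Extract nA, nB, t from benchmark name like 'BM_Compare_E_0_0_0'."""
--     vals = []
--     for part in name.split('_'):
--         try:
--             vals.append(int(part))
--         except ValueError:
--             vals.append(None)
--     while len(vals) >= 3:
--         a, b, c = vals[0], vals[1], vals[2]
--         if a is not None and b is not None and c is not None:
--             return a, b, c
--         vals = vals[1:]
--     return None, None, None
-- ===== Notes on version B (the rewrite author's own statement) =====
-- stated objective: alternative
-- what changed: B parses each underscore-separated part into an int-or-None table once in a single pass, then scans that table for the first window of three consecutive parsed values, instead of A's index loop that re-parses overlapping parts inside a try/except three at a time.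
import Mathlib
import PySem

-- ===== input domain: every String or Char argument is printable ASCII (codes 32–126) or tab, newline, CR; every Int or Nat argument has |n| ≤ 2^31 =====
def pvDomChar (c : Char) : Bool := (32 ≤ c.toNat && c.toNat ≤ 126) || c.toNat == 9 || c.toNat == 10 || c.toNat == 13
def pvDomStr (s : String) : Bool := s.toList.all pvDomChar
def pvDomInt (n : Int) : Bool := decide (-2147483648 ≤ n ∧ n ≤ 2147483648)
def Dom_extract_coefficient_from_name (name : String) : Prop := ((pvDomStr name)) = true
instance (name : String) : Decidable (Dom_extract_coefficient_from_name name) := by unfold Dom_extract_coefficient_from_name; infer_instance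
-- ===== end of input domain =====

-- B re-implements A by parsing every '_'-part once into an int-or-None table, then scanning
-- that table for the first window of three consecutive parsed values (alternative decomposition,
-- same cost); A re-parses overlapping parts inside a try/except for each index. Return-value
-- equivalence is proved on all inputs.

-- ===== PORT A =====
-- for i in range(len(parts)-2): try int(parts[i]), int(parts[i+1]), int(parts[i+2]); except continue
-- (indices i, i+1, i+2 are always in range inside the loop, so pyGetD's default "" is unreachable)
def pvALoop (parts : List String) : List Int → Option (Int × Int × Int)
  | [] => none
  | i :: rest =>
    match PySem.Int.ofStr? (PySem.List.pyGetD parts i "") with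
    | none => pvALoop parts rest
    | some nA =>
      match PySem.Int.ofStr? (PySem.List.pyGetD parts (i + 1) "") with
      | none => pvALoop parts rest
      | some nB =>
        match PySem.Int.ofStr? (PySem.List.pyGetD parts (i + 2) "") with
        | none => pvALoop parts rest
        | some t => some (nA, nB, t)

def extract_coefficient_from_name (name : String) : Option Int × Option Int × Option Int :=
  -- name.split('_'): sep "_" ≠ "", so split? is always some; getD [] is unreachable
  let parts := (PySem.Str.split? name "_").getD []
  match pvALoop parts (PySem.List.pyRange 0 ((parts.length : Int) - 2) 1) with
  | some (nA, nB, t) => (some nA, some nB, some t)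
  | none => (none, none, none)

-- ===== PORT B =====
-- while len(vals) >= 3: return the window if its three heads all parsed, else drop the head
def pvBScan : List (Option Int) → Option (Int × Int × Int)
  | some a :: some b :: some c :: _ => some (a, b, c)
  | _ :: rest => pvBScan rest
  | [] => none

def extract_coefficient_from_name_alt (name : String) : Option Int × Option Int × Option Int :=
  let vals := ((PySem.Str.split? name "_").getD []).map PySem.Int.ofStr?
  match pvBScan vals with
  | some (a, b, c) => (some a, some b, some c)
  | none => (none, none, none)

-- ===== PRECONDITION & SPEC =====
def Spec_extract_coefficient_from_name (name : String) (out : Option Int × Option Int × Option Int) : Prop := out = extract_coefficient_from_name_alt name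
instance (name : String) (out : Option Int × Option Int × Option Int) : Decidable (Spec_extract_coefficient_from_name name out) := by unfold Spec_extract_coefficient_from_name; infer_instance

-- ===== CLAIM (what is proved, stated in full; the proofs are below) =====
def Claim_equal_extract_coefficient_from_name : Prop := ∀ (name : String), Dom_extract_coefficient_from_name name → Spec_extract_coefficient_from_name name (extract_coefficient_from_name name)

-- ===== LEMMAS AND PROOFS =====

-- the core correspondence: A's index loop over the suffix `suf` of `pre ++ suf`
-- equals B's window scan of the parse table of `suf`
lemma pvLoop_eq_scan (suf pre : List String) :
    pvALoop (pre ++ suf) (PySem.List.pyRange (pre.length : Int) (((pre ++ suf).length : Int) - 2) 1)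
      = pvBScan (suf.map PySem.Int.ofStr?) := by
  induction suf generalizing pre with
  | nil =>
    rw [PySem.List.pyRange_one_eq_nil
      (by simp only [List.append_nil]; omega)]
    rfl
  | cons s rest ih =>
    match rest with
    | [] =>
      rw [PySem.List.pyRange_one_eq_nil
        (by simp only [List.length_append, List.length_cons, List.length_nil]; omega)]
      cases PySem.Int.ofStr? s <;> simp [pvALoop, pvBScan]
    | [r0] =>
      rw [PySem.List.pyRange_one_eq_nil
        (by simp only [List.length_append, List.length_cons, List.length_nil]; omega)]
      cases PySem.Int.ofStr? s <;> cases PySem.Int.ofStr? r0 <;> simp [pvALoop, pvBScan]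
    | r0 :: r1 :: rest' =>
      have hlen : ((pre.length : Int)) < ((pre ++ s :: r0 :: r1 :: rest').length : Int) - 2 := by
        simp only [List.length_append, List.length_cons]; push_cast; omega
      rw [PySem.List.pyRange_one_cons hlen]
      have h0 : PySem.List.pyGetD (pre ++ s :: r0 :: r1 :: rest') (pre.length : Int) "" = s := by
        rw [PySem.List.pyGetD_of_nonneg _ _ (by omega),
            show ((pre.length : Int)).toNat = pre.length from by omega]
        simp [List.getD_eq_getElem?_getD]
      have h1 : PySem.List.pyGetD (pre ++ s :: r0 :: r1 :: rest') ((pre.length : Int) + 1) "" = r0 := by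
        rw [PySem.List.pyGetD_of_nonneg _ _ (by omega),
            show ((pre.length : Int) + 1).toNat = pre.length + 1 from by omega]
        simp [List.getD_eq_getElem?_getD]
      have h2 : PySem.List.pyGetD (pre ++ s :: r0 :: r1 :: rest') ((pre.length : Int) + 2) "" = r1 := by
        rw [PySem.List.pyGetD_of_nonneg _ _ (by omega),
            show ((pre.length : Int) + 2).toNat = pre.length + 2 from by omega]
        simp [List.getD_eq_getElem?_getD]
      have hrec : pvALoop (pre ++ s :: r0 :: r1 :: rest')
            (PySem.List.pyRange ((pre.length : Int) + 1)
              (((pre ++ s :: r0 :: r1 :: rest').length : Int) - 2) 1)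
          = pvBScan ((r0 :: r1 :: rest').map PySem.Int.ofStr?) := by
        have h := ih (pre := pre ++ [s])
        simp only [List.append_assoc, List.singleton_append, List.length_append,
          List.length_cons, List.length_nil] at h ⊢
        convert h using 3
      simp only [pvALoop, h0, h1, h2]
      cases hs : PySem.Int.ofStr? s with
      | none => simpa [pvBScan, hs] using hrec
      | some a =>
        cases hr0 : PySem.Int.ofStr? r0 with
        | none => simpa [pvBScan, hs, hr0] using hrec
        | some b =>
          cases hr1 : PySem.Int.ofStr? r1 with
          | none => simpa [pvBScan, hs, hr0, hr1] using hrec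
          | some c => simp [pvBScan, hs, hr0, hr1]

-- ===== VERDICT (by name: the statement is the Claim_ definition above) =====
theorem extract_coefficient_from_name_spec : Claim_equal_extract_coefficient_from_name := by
  intro name _
  unfold Spec_extract_coefficient_from_name extract_coefficient_from_name extract_coefficient_from_name_alt
  have h := pvLoop_eq_scan ((PySem.Str.split? name "_").getD []) []
  simp only [List.nil_append, List.length_nil, Nat.cast_zero] at h
  simp only [h]
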